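-- pv_equiv track=rewrite | github.com/oryon-dominik/tailwind-class-prefixer | application/parser/tailwind.py | join_classbindings
-- ===== SOURCE A (Python) =====
-- def join_classbindings(classes: list) -> list:
--     """Join all previously split classbindings into a single str."""
--     bind = False
--     cleaned = []
--     classbindings = []
--
--     # differentiate between classbindings and normal classes
--     for klass in classes:
--         if klass == "{":
--             bind = True
--         if klass == "}":
--             classbindings.append(klass)
--             cleaned.append(" ".join(classbindings))
--             bind = False
--             classbindings = []
--             continue
--
--         if bind:
--             classbindings.append(klass)
--         elif bind is False:
--             cleaned.append(klass)
--
--     return cleaned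
-- ===== SOURCE B (Python) =====
-- def join_classbindings(classes: list) -> list:
--     """Join all previously split classbindings into a single str."""
--     cleaned = []
--     i, n = 0, len(classes)
--     while i < n:
--         tok = classes[i]
--         if tok == "{":
--             try:
--                 k = classes.index("}", i + 1)
--             except ValueError:
--                 break  # unclosed group: everything from "{" on is dropped
--             cleaned.append(" ".join(classes[i:k + 1]))
--             i = k + 1
--         else:
--             cleaned.append(tok)
--             i += 1
--     return cleaned
-- ===== Notes on version B (the rewrite author's own statement) =====
-- stated objective: simpler
-- what changed: Replaced A's boolean-flag state machine (bind flag plus a mutable classbindings accumulator carried across iterations) by an index-driven loop that, on '{', locates the whole group at once with classes.index('}', i+1), joins the slice classes[i:k+1], and jumps past it -- no flag or partial-group state survives between iterations.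
import Mathlib
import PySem

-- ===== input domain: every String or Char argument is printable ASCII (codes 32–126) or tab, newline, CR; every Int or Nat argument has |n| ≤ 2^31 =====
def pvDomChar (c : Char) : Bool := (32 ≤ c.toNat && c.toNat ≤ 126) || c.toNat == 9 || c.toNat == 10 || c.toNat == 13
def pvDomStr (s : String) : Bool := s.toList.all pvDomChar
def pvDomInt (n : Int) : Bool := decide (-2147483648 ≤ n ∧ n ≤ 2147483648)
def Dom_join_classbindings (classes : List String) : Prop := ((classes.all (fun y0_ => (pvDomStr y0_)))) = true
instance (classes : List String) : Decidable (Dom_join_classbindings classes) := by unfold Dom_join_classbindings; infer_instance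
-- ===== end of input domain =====

-- B replaces A's boolean-flag state machine by an index-driven scan that consumes a whole
-- {...} group at a time via list.index and one slice; objective: simpler decomposition, same O(n) cost.

-- ===== PORT A =====
-- state = (bind, cleaned, classbindings); one fold step = one iteration of A's for-loop
def aStep (s : Bool × List String × List String) (klass : String) : Bool × List String × List String :=
  let bind := if klass = "{" then true else s.1
  if klass = "}" then
    (false, s.2.1 ++ [PySem.Str.join " " (s.2.2 ++ [klass])], [])
  else if bind then
    (bind, s.2.1, s.2.2 ++ [klass])
  else
    (bind, s.2.1 ++ [klass], s.2.2)

def join_classbindings (classes : List String) : List String :=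
  (classes.foldl aStep (false, [], [])).2.1

-- ===== PORT B =====
-- Source B's while loop over index i; classes.index("}", i+1) is the first index ≥ i+1 holding "}",
-- exact as PySem.List.index? on the dropped suffix shifted back by i+1; classes[i:k+1] is a slice
-- with nonnegative in-range bounds, ported as PySem.List.slice.
def altGo (classes : List String) (i : Nat) : List String :=
  if h : i < classes.length then
    let tok := classes[i]
    if tok = "{" then
      match PySem.List.index? (classes.drop (i + 1)) "}" with
      | none => []  -- ValueError: unclosed group, break
      | some k0 =>
          let k := i + 1 + k0
          PySem.Str.join " " (PySem.List.slice classes (some (i : Int)) (some ((k : Int) + 1))) ::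
            altGo classes (k + 1)
    else
      tok :: altGo classes (i + 1)
  else []
termination_by classes.length - i
decreasing_by
  · omega
  · omega

def join_classbindings_alt (classes : List String) : List String := altGo classes 0

-- ===== PRECONDITION & SPEC =====
def Spec_join_classbindings (classes : List String) (out : List String) : Prop := out = join_classbindings_alt classes
instance (classes : List String) (out : List String) : Decidable (Spec_join_classbindings classes out) := by unfold Spec_join_classbindings; infer_instance

-- ===== CLAIM (what is proved, stated in full; the proofs are below) =====
def Claim_equal_join_classbindings : Prop := ∀ (classes : List String), Dom_join_classbindings classes → Spec_join_classbindings classes (join_classbindings classes)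

-- ===== LEMMAS AND PROOFS =====

-- Proof-side suffix version of B's scan: altGo classes i = gGo (classes.drop i).
def gGo : List String → List String
  | [] => []
  | tok :: rest =>
    if tok = "{" then
      match PySem.List.index? rest "}" with
      | none => []
      | some k0 =>
          PySem.Str.join " " ("{" :: rest.take k0 ++ ["}"]) :: gGo (rest.drop (k0 + 1))
    else
      tok :: gGo rest
termination_by l => l.length
decreasing_by
  · simp only [List.length_cons, List.length_drop]; omega
  · simp

theorem altGo_eq_gGo : ∀ (fuel : Nat) (classes : List String) (i : Nat),
    classes.length - i ≤ fuel → altGo classes i = gGo (classes.drop i) := by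
  intro fuel
  induction fuel with
  | zero =>
    intro classes i hf
    have h : ¬ i < classes.length := by omega
    rw [altGo, dif_neg h, List.drop_eq_nil_of_le (by omega), gGo]
  | succ fuel ih =>
    intro classes i hf
    by_cases h : i < classes.length
    · have hdrop : classes.drop i = classes[i] :: classes.drop (i + 1) :=
        List.drop_eq_getElem_cons h
      rw [altGo, dif_pos h, hdrop, gGo]
      by_cases hob : classes[i] = "{"
      · simp only [hob]
        cases hidx : PySem.List.index? (classes.drop (i + 1)) "}" with
        | none => rfl
        | some k0 =>
          obtain ⟨hk0, hget, -⟩ := PySem.List.getElem_of_index?_eq_some hidx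
          have hklen : k0 < classes.length - (i + 1) := by simpa using hk0
          -- the slice classes[i : i+1+k0+1] is "{" :: take k0 (drop (i+1) classes) ++ ["}"]
          have hslice : PySem.List.slice classes (some (i : Int)) (some (((i + 1 + k0 : Nat) : Int) + 1))
              = "{" :: (classes.drop (i + 1)).take k0 ++ ["}"] := by
            have h1 : (((i + 1 + k0 : Nat) : Int) + 1) = (((i + k0 + 2 : Nat) : Int)) := by
              push_cast; ring
            rw [h1, PySem.List.slice_natCast, hdrop, hob]
            have h2 : i + k0 + 2 - i = k0 + 2 := by omega
            rw [h2]
            simp only [List.take_succ_cons]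
            rw [List.take_add_one, List.getElem?_eq_getElem hk0, hget]
            rfl
          have hdrop2 : classes.drop (i + 1 + k0 + 1) = (classes.drop (i + 1)).drop (k0 + 1) := by
            rw [List.drop_drop]; ring_nf
          simp only [reduceIte]
          rw [hslice, ih classes (i + 1 + k0 + 1) (by omega), hdrop2]
      · rw [if_neg hob, if_neg hob, ih classes (i + 1) (by omega)]
    · rw [altGo, dif_neg h, List.drop_eq_nil_of_le (by omega), gGo]

-- Joint invariant for A's fold, by strong induction on a length bound:
-- (1) from state (false, cleaned, []) the fold produces cleaned ++ gGo rest;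
-- (2) from state (true, cleaned, g) it produces cleaned until the next "}" closes the group g.
theorem fold_invariant : ∀ (n : Nat) (rest : List String), rest.length ≤ n →
    (∀ cleaned, (List.foldl aStep (false, cleaned, []) rest).2.1 = cleaned ++ gGo rest) ∧
    (∀ cleaned g, (List.foldl aStep (true, cleaned, g) rest).2.1 =
      match PySem.List.index? rest "}" with
      | none => cleaned
      | some k => (cleaned ++ [PySem.Str.join " " (g ++ rest.take k ++ ["}"])]) ++
          gGo (rest.drop (k + 1))) := by
  intro n
  induction n with
  | zero =>
    intro rest hlen
    have : rest = [] := List.eq_nil_of_length_eq_zero (Nat.le_zero.mp hlen)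
    subst this
    refine ⟨fun cleaned => by simp [gGo], fun cleaned g => by
      simp [PySem.List.index?]⟩
  | succ n ih =>
    intro rest hlen
    match rest with
    | [] =>
      refine ⟨fun cleaned => by simp [gGo], fun cleaned g => by
        simp [PySem.List.index?]⟩
    | t :: rest =>
      have hrest : rest.length ≤ n := by simpa using Nat.lt_succ_iff.mp (Nat.lt_of_lt_of_le (by simp) hlen)
      constructor
      · intro cleaned
        by_cases hob : t = "{"
        · subst hob
          have step : aStep (false, cleaned, []) "{" = (true, cleaned, ["{"]) := by
            simp [aStep]
          rw [List.foldl_cons, step, (ih rest hrest).2 cleaned ["{"]]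
          rw [show gGo ("{" :: rest) = (match PySem.List.index? rest "}" with
            | none => []
            | some k => PySem.Str.join " " ("{" :: rest.take k ++ ["}"]) :: gGo (rest.drop (k + 1)))
            from by rw [gGo]; simp]
          cases PySem.List.index? rest "}" with
          | none => simp
          | some k => simp
        · by_cases hcb : t = "}"
          · subst hcb
            have step : aStep (false, cleaned, []) "}" =
                (false, cleaned ++ [PySem.Str.join " " ["}"]], []) := by
              simp [aStep]
            rw [List.foldl_cons, step, (ih rest hrest).1]
            rw [show gGo ("}" :: rest) = "}" :: gGo rest from by rw [gGo]; simp]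
            have : PySem.Str.join " " ["}"] = "}" := by decide
            simp [this]
          · have step : aStep (false, cleaned, []) t = (false, cleaned ++ [t], []) := by
              simp [aStep, hob, hcb]
            rw [List.foldl_cons, step, (ih rest hrest).1]
            rw [show gGo (t :: rest) = t :: gGo rest from by rw [gGo]; simp [hob]]
            simp
      · intro cleaned g
        by_cases hcb : t = "}"
        · subst hcb
          have step : aStep (true, cleaned, g) "}" =
              (false, cleaned ++ [PySem.Str.join " " (g ++ ["}"])], []) := by
            simp [aStep]
          rw [List.foldl_cons, step, (ih rest hrest).1]
          rw [PySem.List.index?_cons_self]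
          simp
        · have step : aStep (true, cleaned, g) t = (true, cleaned, g ++ [t]) := by
            by_cases hob : t = "{" <;> simp [aStep, hcb, hob]
          rw [List.foldl_cons, step, (ih rest hrest).2 cleaned (g ++ [t])]
          rw [PySem.List.index?_cons_of_ne rest hcb]
          cases PySem.List.index? rest "}" with
          | none => simp
          | some k => simp [List.take_succ_cons, List.drop_succ_cons]

-- ===== VERDICT (by name: the statement is the Claim_ definition above) =====
theorem join_classbindings_spec : Claim_equal_join_classbindings := by
  intro classes _
  unfold Spec_join_classbindings join_classbindings join_classbindings_alt
  rw [altGo_eq_gGo classes.length classes 0 (by omega), List.drop_zero]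
  simpa using (fold_invariant classes.length classes le_rfl).1 []
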